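-- pv_equiv track=rewrite | github.com/ItsLucas93/PRJ-SM602 | algorithms/test.py | find_best_improving_edge
-- ===== SOURCE A (Python) =====
-- def find_best_improving_edge(marginal_costs):
--     min_cost = float('inf')
--     best_edge = None
--     for i in range(len(marginal_costs)):
--         for j in range(len(marginal_costs[i])):
--             if marginal_costs[i][j] < min_cost:
--                 min_cost = marginal_costs[i][j]
--                 best_edge = (i, j)
--     return best_edge
-- ===== SOURCE B (Python) =====
-- def find_best_improving_edge(marginal_costs):
--     # Phase 1: per-row summaries (row index, row minimum, column of first occurrence)
--     summaries = []
--     i = 0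
--     for row in marginal_costs:
--         if row:
--             m = row[0]
--             jm = 0
--             j = 1
--             for v in row[1:]:
--                 if v < m:
--                     m = v
--                     jm = j
--                 j += 1
--             summaries.append((i, m, jm))
--         i += 1
--     # Phase 2: pick the summary with the smallest value (first wins ties)
--     if not summaries:
--         return None
--     best = summaries[0]
--     for s in summaries[1:]:
--         if s[1] < best[1]:
--             best = s
--     return (best[0], best[2])
-- ===== Notes on version B (the rewrite author's own statement) =====
-- stated objective: alternative
-- what changed: Replaces A's single nested scan updating one global (min, edge) state with a two-phase decomposition: phase 1 computes a per-row (min value, first argmin column) summary for each non-empty row, phase 2 reduces the summaries to the best row with strict <.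
import Mathlib
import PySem

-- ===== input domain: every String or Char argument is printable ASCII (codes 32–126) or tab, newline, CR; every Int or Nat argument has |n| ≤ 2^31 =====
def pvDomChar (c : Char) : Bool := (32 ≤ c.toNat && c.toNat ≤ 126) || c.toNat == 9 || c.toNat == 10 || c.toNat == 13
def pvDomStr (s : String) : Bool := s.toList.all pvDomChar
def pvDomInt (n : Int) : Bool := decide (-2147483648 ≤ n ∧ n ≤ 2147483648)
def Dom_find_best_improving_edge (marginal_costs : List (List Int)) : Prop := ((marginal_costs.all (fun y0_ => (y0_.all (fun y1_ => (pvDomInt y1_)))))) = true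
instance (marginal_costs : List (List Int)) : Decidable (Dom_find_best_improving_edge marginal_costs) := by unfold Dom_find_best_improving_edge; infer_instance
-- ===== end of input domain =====

-- B replaces A's single nested scan with a two-phase decomposition (per-row (min, argmin)
-- summaries, then a reduction over the summaries); same return value, alternative structure.

-- ===== PORT A =====
-- A's min_cost starts at float('inf'); since all entries are ints, it is modelled as
-- Option Int with none = inf (the comparison v < inf is always true, hence the none branch
-- always updates). The nested for loops become structural recursions carrying i resp. j.
def fbieInner (i j : Int) (row : List Int) (min_cost : Option Int) (best_edge : Option (Int × Int)) :
    Option Int × Option (Int × Int) :=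
  match row with
  | [] => (min_cost, best_edge)
  | v :: rest =>
    match min_cost with
    | none => fbieInner i (j+1) rest (some v) (some (i, j))
    | some m =>
      if v < m then fbieInner i (j+1) rest (some v) (some (i, j))
      else fbieInner i (j+1) rest (some m) best_edge

def fbieOuter (i : Int) (rows : List (List Int)) (min_cost : Option Int) (best_edge : Option (Int × Int)) :
    Option Int × Option (Int × Int) :=
  match rows with
  | [] => (min_cost, best_edge)
  | row :: rest =>
    match fbieInner i 0 row min_cost best_edge with
    | (mc', be') => fbieOuter (i+1) rest mc' be'

def find_best_improving_edge (marginal_costs : List (List Int)) : Option (Int × Int) :=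
  (fbieOuter 0 marginal_costs none none).2

-- ===== PORT B =====
-- phase-1 inner loop of Source B: running (m, jm) over the tail of a row, j = next column index
def fbieRowMin (m jm j : Int) (rest : List Int) : Int × Int :=
  match rest with
  | [] => (m, jm)
  | v :: t => if v < m then fbieRowMin v j (j+1) t else fbieRowMin m jm (j+1) t

-- phase-1 outer loop: one (row index, row min, argmin column) summary per non-empty row
def fbieSummaries (i : Int) (rows : List (List Int)) : List (Int × Int × Int) :=
  match rows with
  | [] => []
  | [] :: rest => fbieSummaries (i+1) rest
  | (v :: vs) :: rest =>
    (i, (fbieRowMin v 0 1 vs).1, (fbieRowMin v 0 1 vs).2) :: fbieSummaries (i+1) rest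

-- phase-2 loop: best summary, strict < so the first one wins ties
def fbieSelect (best : Int × Int × Int) (rest : List (Int × Int × Int)) : Int × Int × Int :=
  match rest with
  | [] => best
  | s :: t => fbieSelect (if s.2.1 < best.2.1 then s else best) t

def find_best_improving_edge_alt (marginal_costs : List (List Int)) : Option (Int × Int) :=
  match fbieSummaries 0 marginal_costs with
  | [] => none
  | s :: rest => some ((fbieSelect s rest).1, (fbieSelect s rest).2.2)

-- ===== PRECONDITION & SPEC =====
def Spec_find_best_improving_edge (marginal_costs : List (List Int)) (out : Option (Int × Int)) : Prop := out = find_best_improving_edge_alt marginal_costs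
instance (marginal_costs : List (List Int)) (out : Option (Int × Int)) : Decidable (Spec_find_best_improving_edge marginal_costs out) := by unfold Spec_find_best_improving_edge; infer_instance

-- ===== CLAIM (what is proved, stated in full; the proofs are below) =====
def Claim_equal_find_best_improving_edge : Prop := ∀ (marginal_costs : List (List Int)), Dom_find_best_improving_edge marginal_costs → Spec_find_best_improving_edge marginal_costs (find_best_improving_edge marginal_costs)

-- ===== LEMMAS AND PROOFS =====

-- fbieRowMin's value never exceeds its seed, and equals the seed only if it never updated
lemma fbieRowMin_le : ∀ (vs : List Int) (m jm j : Int),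
    (fbieRowMin m jm j vs).1 ≤ m ∧ ((fbieRowMin m jm j vs).1 = m → (fbieRowMin m jm j vs).2 = jm) := by
  intro vs
  induction vs with
  | nil => intro m jm j; simp [fbieRowMin]
  | cons v t ih =>
    intro m jm j
    by_cases hv : v < m
    · simp only [fbieRowMin, if_pos hv]
      obtain ⟨h1, _⟩ := ih v j (j+1)
      exact ⟨by omega, fun he => by omega⟩
    · simp only [fbieRowMin, if_neg hv]
      exact ih m jm (j+1)

-- A's inner loop, seeded with a finite current minimum cm ≤ the row-min seed m, equals the
-- strict comparison of cm against the row minimum computed by B's fbieRowMin.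
lemma fbieInner_eq_rowMin : ∀ (vs : List Int) (i j cm m jm : Int) (b : Option (Int × Int)),
    cm ≤ m →
    fbieInner i j vs (some cm) b =
      (if (fbieRowMin m jm j vs).1 < cm
       then (some (fbieRowMin m jm j vs).1, some (i, (fbieRowMin m jm j vs).2))
       else (some cm, b)) := by
  intro vs
  induction vs with
  | nil =>
    intro i j cm m jm b h
    simp only [fbieInner, fbieRowMin]
    rw [if_neg (by omega)]
  | cons v t ih =>
    intro i j cm m jm b h
    simp only [fbieInner, fbieRowMin]
    by_cases hv : v < cm
    · have hvm : v < m := by omega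
      rw [if_pos hv, if_pos hvm]
      rw [ih i (j+1) v v j (some (i, j)) le_rfl]
      obtain ⟨hF1, hF2⟩ := fbieRowMin_le t v j (j+1)
      by_cases hr : (fbieRowMin v j (j+1) t).1 < v
      · rw [if_pos hr, if_pos (by omega)]
      · have h1 : (fbieRowMin v j (j+1) t).1 = v := by omega
        rw [if_neg hr, if_pos (by omega), h1, hF2 h1]
    · rw [if_neg hv]
      by_cases hvm : v < m
      · rw [if_pos hvm]
        exact ih i (j+1) cm v j b (by omega)
      · rw [if_neg hvm]
        exact ih i (j+1) cm m jm b h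

-- one full row starting from a finite state
lemma fbieInner_cons_some (v : Int) (vs : List Int) (i bm : Int) (b : Option (Int × Int)) :
    fbieInner i 0 (v :: vs) (some bm) b =
      (if (fbieRowMin v 0 1 vs).1 < bm
       then (some (fbieRowMin v 0 1 vs).1, some (i, (fbieRowMin v 0 1 vs).2))
       else (some bm, b)) := by
  have h01 : (0 : Int) + 1 = 1 := by norm_num
  simp only [fbieInner]
  by_cases hv : v < bm
  · rw [if_pos hv, h01, fbieInner_eq_rowMin vs i 1 v v 0 (some (i, 0)) le_rfl]
    obtain ⟨hF1, hF2⟩ := fbieRowMin_le vs v 0 1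
    by_cases hr : (fbieRowMin v 0 1 vs).1 < v
    · rw [if_pos hr, if_pos (by omega)]
    · have h1 : (fbieRowMin v 0 1 vs).1 = v := by omega
      rw [if_neg hr, if_pos (by omega), h1, hF2 h1]
  · rw [if_neg hv, h01]
    exact fbieInner_eq_rowMin vs i 1 bm v 0 b (by omega)

-- one full row starting from the initial infinite state
lemma fbieInner_cons_none (v : Int) (vs : List Int) (i : Int) (b : Option (Int × Int)) :
    fbieInner i 0 (v :: vs) none b =
      (some (fbieRowMin v 0 1 vs).1, some (i, (fbieRowMin v 0 1 vs).2)) := by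
  have h01 : (0 : Int) + 1 = 1 := by norm_num
  simp only [fbieInner]
  rw [h01, fbieInner_eq_rowMin vs i 1 v v 0 (some (i, 0)) le_rfl]
  obtain ⟨hF1, hF2⟩ := fbieRowMin_le vs v 0 1
  by_cases hr : (fbieRowMin v 0 1 vs).1 < v
  · rw [if_pos hr]
  · have h1 : (fbieRowMin v 0 1 vs).1 = v := by omega
    rw [if_neg hr, h1, hF2 h1]

-- A's outer loop from a finite state is B's selection over the remaining summaries
lemma fbieOuter_some : ∀ (rows : List (List Int)) (i bi bm bj : Int),
    fbieOuter i rows (some bm) (some (bi, bj)) =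
      (some (fbieSelect (bi, bm, bj) (fbieSummaries i rows)).2.1,
       some ((fbieSelect (bi, bm, bj) (fbieSummaries i rows)).1,
             (fbieSelect (bi, bm, bj) (fbieSummaries i rows)).2.2)) := by
  intro rows
  induction rows with
  | nil => intro i bi bm bj; simp [fbieOuter, fbieSummaries, fbieSelect]
  | cons row rest ih =>
    intro i bi bm bj
    cases row with
    | nil =>
      simp only [fbieOuter, fbieInner, fbieSummaries]
      exact ih (i+1) bi bm bj
    | cons v vs =>
      simp only [fbieOuter, fbieSummaries, fbieSelect]
      rw [fbieInner_cons_some]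
      by_cases hm : (fbieRowMin v 0 1 vs).1 < bm
      · rw [if_pos hm]
        simp only [if_pos hm]
        exact ih (i+1) i (fbieRowMin v 0 1 vs).1 (fbieRowMin v 0 1 vs).2
      · rw [if_neg hm]
        simp only [if_neg hm]
        exact ih (i+1) bi bm bj
  
-- A's outer loop from the initial state is B's phase 2 over the summaries
lemma fbieOuter_none : ∀ (rows : List (List Int)) (i : Int),
    fbieOuter i rows none none =
      (match fbieSummaries i rows with
       | [] => ((none : Option Int), (none : Option (Int × Int)))
       | s :: rest =>
         (some (fbieSelect s rest).2.1, some ((fbieSelect s rest).1, (fbieSelect s rest).2.2))) := by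
  intro rows
  induction rows with
  | nil => intro i; simp [fbieOuter, fbieSummaries]
  | cons row rest ih =>
    intro i
    cases row with
    | nil =>
      simp only [fbieOuter, fbieInner, fbieSummaries]
      exact ih (i+1)
    | cons v vs =>
      simp only [fbieOuter, fbieSummaries]
      rw [fbieInner_cons_none]
      exact fbieOuter_some rest (i+1) i (fbieRowMin v 0 1 vs).1 (fbieRowMin v 0 1 vs).2

-- ===== VERDICT (by name: the statement is the Claim_ definition above) =====
theorem find_best_improving_edge_spec : Claim_equal_find_best_improving_edge := by
  intro mc _
  unfold Spec_find_best_improving_edge find_best_improving_edge find_best_improving_edge_alt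
  rw [fbieOuter_none]
  cases h : fbieSummaries 0 mc <;> simp
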